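-- pv_equiv track=rewrite | github.com/jpgoldberg/python-math-utils | src/toy_crypto/utils.py | lsb_to_msb
-- ===== SOURCE A (Python) =====
-- from collections.abc import Generator
--
-- def lsb_to_msb(n: int) -> Generator[int, None, None]:
--     """
--     Creates a generator of bits of n, starting from the least significant bit.
--     """
--
--     if not isinstance(n, int):
--         raise TypeError("n must be an integer")
--
--     if n < 0:
--         raise ValueError("n cannot be negative")
--     while n > 0:
--         yield n & 1
--         n >>= 1
-- ===== SOURCE B (Python) =====
-- def lsb_to_msb(n):
--     """
--     Creates a generator of bits of n, starting from the least significant bit.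
--     """
--     if not isinstance(n, int):
--         raise TypeError("n must be an integer")
--     if n < 0:
--         raise ValueError("n cannot be negative")
--     if n == 0:
--         return
--     for c in reversed(bin(n)[2:]):
--         yield int(c)
-- ===== Notes on version B (the rewrite author's own statement) =====
-- stated objective: idiomatic
-- what changed: B builds the binary string with bin(n) once and iterates over it in reverse, instead of A's destructive shift-and-mask loop on the integer.
import Mathlib
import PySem

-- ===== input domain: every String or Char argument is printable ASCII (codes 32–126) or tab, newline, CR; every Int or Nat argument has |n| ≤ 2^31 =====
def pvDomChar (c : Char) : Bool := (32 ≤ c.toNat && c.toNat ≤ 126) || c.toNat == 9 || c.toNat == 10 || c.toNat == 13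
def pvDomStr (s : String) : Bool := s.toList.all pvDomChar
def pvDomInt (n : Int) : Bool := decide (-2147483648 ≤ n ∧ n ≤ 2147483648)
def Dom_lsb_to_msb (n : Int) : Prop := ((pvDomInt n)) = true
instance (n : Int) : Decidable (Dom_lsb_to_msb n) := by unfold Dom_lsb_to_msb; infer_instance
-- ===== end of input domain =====

-- B builds the binary digit string via bin(n) and walks it in reverse, instead of A's destructive shift-and-mask loop (objective: idiomatic); equivalence proved for n ≥ 0 (A raises ValueError on negative n).


-- ===== PORT A =====
-- A: while n > 0: yield n & 1; n >>= 1   (for n ≥ 0, n & 1 = n mod 2 and n >> 1 = n // 2)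
def lsb_to_msb (n : Int) : List Int :=
  if h : n > 0 then
    PySem.Int.mod n 2 :: lsb_to_msb (PySem.Int.floordiv n 2)
  else []
termination_by n.toNat
decreasing_by
  rw [PySem.Int.floordiv_eq_ediv_of_pos (by omega)]
  omega

-- ===== PORT B =====
-- B: the digits of bin(n)[2:] (MSB-first), mirroring Python's bin
def pvBinDigits (n : Int) : List Int :=
  if h : n > 0 then
    pvBinDigits (PySem.Int.floordiv n 2) ++ [PySem.Int.mod n 2]
  else []
termination_by n.toNat
decreasing_by
  rw [PySem.Int.floordiv_eq_ediv_of_pos (by omega)]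
  omega

-- B: early return on n == 0, else iterate bin(n)[2:] in reverse yielding each digit
def lsb_to_msb_alt (n : Int) : List Int :=
  if n == 0 then [] else (pvBinDigits n).reverse

-- ===== PRECONDITION & SPEC =====
-- Pre_ excludes n < 0, on which A raises ValueError.
def Pre_lsb_to_msb (n : Int) : Prop := 0 ≤ n
instance (n : Int) : Decidable (Pre_lsb_to_msb n) := by unfold Pre_lsb_to_msb; infer_instance
def pvWitness_lsb_to_msb : Int := (6)
def Spec_lsb_to_msb (n : Int) (out : List Int) : Prop := out = lsb_to_msb_alt n
instance (n : Int) (out : List Int) : Decidable (Spec_lsb_to_msb n out) := by unfold Spec_lsb_to_msb; infer_instance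

-- ===== CLAIM (what is proved, stated in full; the proofs are below) =====
def Claim_equal_lsb_to_msb : Prop := ∀ (n : Int), Dom_lsb_to_msb n → Pre_lsb_to_msb n → Spec_lsb_to_msb n (lsb_to_msb n)

-- ===== LEMMAS AND PROOFS =====

-- A's LSB-first bit list is the reverse of B's MSB-first digit list.
theorem lsb_eq_reverse_binDigits (n : Int) : lsb_to_msb n = (pvBinDigits n).reverse := by
  by_cases h : n > 0
  · rw [lsb_to_msb, pvBinDigits, dif_pos h, dif_pos h, List.reverse_append,
      lsb_eq_reverse_binDigits (PySem.Int.floordiv n 2)]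
    simp
  · rw [lsb_to_msb, pvBinDigits, dif_neg h, dif_neg h]
    simp
termination_by n.toNat
decreasing_by
  rw [PySem.Int.floordiv_eq_ediv_of_pos (by omega)]
  omega

-- ===== VERDICT (by name: the statement is the Claim_ definition above) =====
theorem lsb_to_msb_spec : Claim_equal_lsb_to_msb := by
  intro n _ _
  unfold Spec_lsb_to_msb lsb_to_msb_alt
  by_cases h0 : n = 0
  · subst h0; rw [lsb_to_msb]; simp
  · rw [if_neg (by simpa using h0)]
    exact lsb_eq_reverse_binDigits n
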